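-- pv_equiv track=rewrite | github.com/hedge0207/algorithm | programmers/lv2_할인행사.py | solution
-- ===== SOURCE A (Python) =====
-- def solution(want, number, discount):
--     answer = 0
--     items = {item:num for item, num in zip(want, number)}
--
--     cart = {}
--     for item in discount[:10]:
--         if item not in cart:
--             cart[item] = 1
--         else:
--             cart[item] += 1
--
--     st = 0
--     ed = 9
--     while ed < len(discount)-1:
--         item_removed = discount[st]
--         if cart.get(item_removed):
--             cart[item_removed] -= 1
--             if cart[item_removed] == 0:
--                 cart.pop(item_removed)
--         st += 1
--
--         ed += 1
--         item_added = discount[ed]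
--         if cart.get(item_added):
--             cart[item_added] += 1
--         else:
--             cart[item_added] = 1
--
--         if items == cart:
--             answer += 1
--
--     return answer
-- ===== SOURCE B (Python) =====
-- def solution(want, number, discount):
--     need = {}
--     for item, num in zip(want, number):
--         need[item] = num
--     total = 0
--     for s in range(len(discount) - 9):
--         window = {}
--         for item in discount[s:s+10]:
--             window[item] = window.get(item, 0) + 1
--         if window == need:
--             total += 1
--     return total
-- ===== Notes on version B (the rewrite author's own statement) =====
-- stated objective: simpler
-- what changed: Replaces A's stateful sliding-window dict (incremental remove/add of counts with pop bookkeeping) by a direct per-window recount: for each start index build the window's counter from scratch and compare; and it counts the first window, which A skips.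
-- intended difference: On inputs where discount has length >= 10 and the item counts of the first 10-day window equal the wanted dict, A returns one less than the number of matching windows because its loop compares only after the first slide and never checks the window starting at day 0; B counts that window too, which is the intended answer to the problem. — e.g. on solution(["a"], [10], ["a", "a", "a", "a", "a", "a", "a", "a", "a", "a"]): A returns 0, B returns 1
import Mathlib
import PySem

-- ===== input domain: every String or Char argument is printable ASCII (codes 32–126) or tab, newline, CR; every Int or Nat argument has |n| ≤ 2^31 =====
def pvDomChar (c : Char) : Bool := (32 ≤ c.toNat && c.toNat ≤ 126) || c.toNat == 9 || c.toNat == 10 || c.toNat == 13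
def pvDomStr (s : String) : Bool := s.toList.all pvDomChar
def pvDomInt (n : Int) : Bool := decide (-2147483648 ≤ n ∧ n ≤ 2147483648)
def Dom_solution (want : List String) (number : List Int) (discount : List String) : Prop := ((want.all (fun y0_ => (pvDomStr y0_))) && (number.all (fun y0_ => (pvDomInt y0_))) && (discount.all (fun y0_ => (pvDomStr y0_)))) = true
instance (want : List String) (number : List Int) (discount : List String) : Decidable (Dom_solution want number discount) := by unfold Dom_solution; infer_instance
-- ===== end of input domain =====

-- B replaces A's stateful sliding-window dict by a direct per-window recount (simpler, same cost),
-- and counts the first 10-day window, which A's loop skips (see D_solution below).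

-- Python's `d1 == d2` on dicts: same key set and same value at every key (order-insensitive).
def pvDictEqB (d e : PySem.Dict String Int) : Bool :=
  d.keys.all (fun k => e.get? k == d.get? k) && e.keys.all (fun k => d.contains k)

-- ===== PORT A =====
-- the body of A's `while` loop, iteration i has st = i, ed = i + 10 (after the increments)
def pvRemove (c : PySem.Dict String Int) (item : String) : PySem.Dict String Int :=
  match c.get? item with                        -- `if cart.get(item_removed):` — truthy = present and nonzero
  | some v =>
      if v ≠ 0 then
        let c' := c.insert item (v - 1)         -- `cart[item_removed] -= 1`
        if v - 1 = 0 then c'.erase item else c' -- `if cart[item_removed] == 0: cart.pop(item_removed)`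
      else c
  | none => c

def pvAdd (c : PySem.Dict String Int) (item : String) : PySem.Dict String Int :=
  match c.get? item with                        -- `if cart.get(item_added):`
  | some v => if v ≠ 0 then c.insert item (v + 1) else c.insert item 1
  | none => c.insert item 1

def pvStep (items : PySem.Dict String Int) (discount : List String)
    (s : PySem.Dict String Int × Int) (i : Nat) : PySem.Dict String Int × Int :=
  let c1 := pvRemove s.1 (discount.getD i "")          -- discount[st]; st = i is always in range
  let c2 := pvAdd c1 (discount.getD (i + 10) "")       -- discount[ed]; ed = i + 10 is always in range
  (c2, if pvDictEqB items c2 then s.2 + 1 else s.2)    -- `if items == cart: answer += 1`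

def solution (want : List String) (number : List Int) (discount : List String) : Int :=
  let items := (want.zip number).foldl (fun d p => d.insert p.1 p.2) PySem.Dict.empty
  let cart0 := (PySem.List.slice discount none (some 10)).foldl     -- discount[:10]
      (fun c item => if ¬ c.contains item then c.insert item 1 else c.insert item (c.getD item 0 + 1))
      PySem.Dict.empty
  -- `while ed < len(discount)-1` starting at st=0, ed=9 runs len(discount)-10 iterations
  ((List.range (discount.length - 10)).foldl (pvStep items discount) (cart0, 0)).2

-- ===== PORT B =====
def solution_alt (want : List String) (number : List Int) (discount : List String) : Int :=
  let need := (want.zip number).foldl (fun d p => d.insert p.1 p.2) PySem.Dict.empty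
  (List.range (discount.length - 9)).foldl                          -- `for s in range(len(discount) - 9):`
    (fun (total : Int) (s : Nat) =>
      let window := (PySem.List.slice discount (some (s : Int)) (some ((s : Int) + 10))).foldl
        (fun d item => d.insert item (d.getD item 0 + 1)) PySem.Dict.empty
      if pvDictEqB window need then total + 1 else total)
    (0 : Int)

-- ===== PRECONDITION & SPEC =====
-- On inputs where discount has length >= 10 and the item counts of the first 10-day window equal the
-- wanted dict, A returns one less than the number of matching windows (its loop compares only after the
-- first slide, never the window starting at day 0); B counts that window too, the intended answer.
def D_solution (want : List String) (number : List Int) (discount : List String) : Prop :=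
  10 ≤ discount.length ∧
  pvDictEqB (PySem.Dict.counter (discount.take 10)) (PySem.Dict.ofList (want.zip number)) = true
instance (want : List String) (number : List Int) (discount : List String) : Decidable (D_solution want number discount) := by unfold D_solution; infer_instance

def Spec_solution (want : List String) (number : List Int) (discount : List String) (out : Int) : Prop := ¬ D_solution want number discount → out = solution_alt want number discount
instance (want : List String) (number : List Int) (discount : List String) (out : Int) : Decidable (Spec_solution want number discount out) := by unfold Spec_solution; infer_instance

def pvDiffWitness_solution : List String × List Int × List String :=
  (["a"], [10], ["a", "a", "a", "a", "a", "a", "a", "a", "a", "a"])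
def pvDiffWitnessOut_solution : Int × Int := (0, 1)

-- ===== CLAIM (what is proved, stated in full; the proofs are below) =====
def Claim_unchanged_solution : Prop := ∀ (want : List String) (number : List Int) (discount : List String), Dom_solution want number discount → Spec_solution want number discount (solution want number discount)
def Claim_changed_solution : Prop := Dom_solution (pvDiffWitness_solution.1) (pvDiffWitness_solution.2.1) (pvDiffWitness_solution.2.2) ∧ D_solution (pvDiffWitness_solution.1) (pvDiffWitness_solution.2.1) (pvDiffWitness_solution.2.2) ∧ solution (pvDiffWitness_solution.1) (pvDiffWitness_solution.2.1) (pvDiffWitness_solution.2.2) = pvDiffWitnessOut_solution.1 ∧ solution_alt (pvDiffWitness_solution.1) (pvDiffWitness_solution.2.1) (pvDiffWitness_solution.2.2) = pvDiffWitnessOut_solution.2 ∧ pvDiffWitnessOut_solution.1 ≠ pvDiffWitnessOut_solution.2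
def Claim_exact_solution : Prop := ∀ (want : List String) (number : List Int) (discount : List String), Dom_solution want number discount → D_solution want number discount → solution want number discount ≠ solution_alt want number discount

-- ===== LEMMAS AND PROOFS =====

def pvEnc (n : Nat) : Option Int := if n = 0 then none else some (n : Int)

-- `c` represents the multiset of `xs` the way a Python count-dict does
def pvRep (c : PySem.Dict String Int) (xs : List String) : Prop :=
  c.keys.Nodup ∧ ∀ k, c.get? k = pvEnc (xs.count k)

-- the 10-day window starting at day s
def pvWin (discount : List String) (s : Nat) : List String := (discount.drop s).take 10

theorem pvDictEqB_iff (d e : PySem.Dict String Int) :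
    pvDictEqB d e = true ↔ ∀ k, d.get? k = e.get? k := by
  unfold pvDictEqB
  simp only [Bool.and_eq_true, List.all_eq_true, beq_iff_eq]
  constructor
  · rintro ⟨h1, h2⟩ k
    by_cases hk : k ∈ d.keys
    · exact (h1 k hk).symm
    · rw [(PySem.Dict.get?_eq_none_iff_not_mem_keys d k).2 hk]
      by_cases he : k ∈ e.keys
      · exact absurd ((PySem.Dict.contains_iff_mem_keys d k).1 (h2 k he)) hk
      · rw [(PySem.Dict.get?_eq_none_iff_not_mem_keys e k).2 he]
  · intro h
    refine ⟨fun k _ => (h k).symm, fun k hk => ?_⟩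
    rw [PySem.Dict.contains_eq_isSome_get?, h k, ← PySem.Dict.contains_eq_isSome_get?]
    exact (PySem.Dict.contains_iff_mem_keys e k).2 hk

theorem counter_get?_eq_enc (xs : List String) (k : String) :
    (PySem.Dict.counter xs).get? k = pvEnc (xs.count k) := by
  have hc := PySem.Dict.contains_counter xs k
  have hg := PySem.Dict.getD_counter xs k
  rw [PySem.Dict.contains_eq_isSome_get?] at hc
  rw [PySem.Dict.getD_eq_get?_getD] at hg
  unfold pvEnc
  cases hopt : (PySem.Dict.counter xs).get? k with
  | none =>
      rw [hopt] at hc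
      have : k ∉ xs := by simpa using hc.symm
      rw [if_pos (List.count_eq_zero.2 this)]
  | some v =>
      rw [hopt] at hc hg
      simp only [Option.getD_some] at hg
      have hmem : k ∈ xs := by simpa using hc.symm
      have hpos : 0 < xs.count k := List.count_pos_iff.2 hmem
      rw [if_neg hpos.ne', hg]

theorem pv_find?_filter_ne (l : List (String × Int)) (k k' : String) (hne : k' ≠ k) :
    List.find? (fun p => p.1 == k') (l.filter (fun p => !(p.1 == k))) =
      List.find? (fun p => p.1 == k') l := by
  induction l with
  | nil => rfl
  | cons p t ih =>
      by_cases h1 : p.1 = k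
      · have h2 : (p.1 == k') = false := by simp [h1, Ne.symm hne]
        simp [List.filter_cons, List.find?_cons, h1, h2, ih, beq_iff_eq, Ne.symm hne]
      · by_cases h3 : p.1 = k'
        · simp [List.filter_cons, List.find?_cons, h1, h3, hne]
        · simp [List.filter_cons, List.find?_cons, h1, h3, ih]

theorem get?_erase (d : PySem.Dict String Int) (k k' : String) :
    (d.erase k).get? k' = if k' = k then none else d.get? k' := by
  rcases d with ⟨l⟩
  simp only [PySem.Dict.erase, PySem.Dict.get?]
  by_cases h2 : k' = k
  · subst h2
    rw [if_pos rfl, List.find?_eq_none.2, Option.map_none]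
    intro x hx
    have := (List.mem_filter.1 hx).2
    simp at this ⊢
    exact this
  · rw [if_neg h2, pv_find?_filter_ne l k k' h2]

theorem nodup_keys_erase (d : PySem.Dict String Int) (k : String) (h : d.keys.Nodup) :
    (d.erase k).keys.Nodup := by
  have hs : (d.erase k).keys.Sublist d.keys := by
    simp only [PySem.Dict.keys, PySem.Dict.erase]
    exact List.filter_sublist.map _
  exact h.sublist hs

theorem pvDictEqB_congr (a d e : PySem.Dict String Int)
    (h : ∀ k, d.get? k = e.get? k) : pvDictEqB a d = pvDictEqB a e := by
  have h1 := pvDictEqB_iff a d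
  have h2 := pvDictEqB_iff a e
  have : pvDictEqB a d = true ↔ pvDictEqB a e = true := by
    rw [h1, h2]
    exact forall_congr' fun k => by rw [h k]
  cases hb : pvDictEqB a d <;> cases hc : pvDictEqB a e <;> simp_all

theorem pvDictEqB_symm (d e : PySem.Dict String Int) : pvDictEqB d e = pvDictEqB e d := by
  have : pvDictEqB d e = true ↔ pvDictEqB e d = true := by
    rw [pvDictEqB_iff, pvDictEqB_iff]
    exact ⟨fun h k => (h k).symm, fun h k => (h k).symm⟩
  cases hb : pvDictEqB d e <;> cases hc : pvDictEqB e d <;> simp_all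

theorem pvRep_counter (xs : List String) : pvRep (PySem.Dict.counter xs) xs :=
  ⟨PySem.Dict.nodup_keys_counter xs, fun k => counter_get?_eq_enc xs k⟩

theorem pvRep_remove (c : PySem.Dict String Int) (x : String) (ys : List String)
    (h : pvRep c (x :: ys)) : pvRep (pvRemove c x) ys := by
  obtain ⟨hnd, hget⟩ := h
  have hx := hget x
  rw [List.count_cons_self] at hx
  unfold pvEnc at hx
  rw [if_neg (Nat.succ_ne_zero _)] at hx
  unfold pvRemove
  rw [hx]
  simp only
  have hv : ((ys.count x + 1 : Nat) : Int) ≠ 0 := by positivity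
  rw [if_pos hv]
  have hsub : ((ys.count x + 1 : Nat) : Int) - 1 = (ys.count x : Int) := by push_cast; ring
  by_cases h0 : ys.count x = 0
  · rw [if_pos (by rw [hsub, h0]; rfl)]
    refine ⟨nodup_keys_erase _ _ (PySem.Dict.nodup_keys_insert _ _ _ hnd), fun k => ?_⟩
    rw [get?_erase]
    by_cases hk : k = x
    · rw [if_pos hk, hk, pvEnc, if_pos h0]
    · rw [if_neg hk, PySem.Dict.get?_insert, if_neg hk, hget k]
      simp [List.count_cons, beq_iff_eq, hk, Ne.symm hk]
  · rw [if_neg (by rw [hsub]; exact_mod_cast h0)]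
    refine ⟨PySem.Dict.nodup_keys_insert _ _ _ hnd, fun k => ?_⟩
    rw [PySem.Dict.get?_insert]
    by_cases hk : k = x
    · rw [if_pos hk, hk, hsub, pvEnc, if_neg h0]
    · rw [if_neg hk, hget k]
      simp [List.count_cons, beq_iff_eq, hk, Ne.symm hk]

theorem pvRep_add (c : PySem.Dict String Int) (y : String) (ys : List String)
    (h : pvRep c ys) : pvRep (pvAdd c y) (ys ++ [y]) := by
  obtain ⟨hnd, hget⟩ := h
  have hy := hget y
  have hcount : ∀ k, k ≠ y → (ys ++ [y]).count k = ys.count k := by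
    intro k hk
    rw [List.count_append, List.count_singleton']
    simp [Ne.symm hk]
  by_cases h0 : ys.count y = 0
  · rw [pvEnc, if_pos h0] at hy
    unfold pvAdd
    rw [hy]
    refine ⟨PySem.Dict.nodup_keys_insert _ _ _ hnd, fun k => ?_⟩
    rw [PySem.Dict.get?_insert]
    by_cases hk : k = y
    · rw [if_pos hk, hk, pvEnc, List.count_append, List.count_singleton, h0]
      norm_num
    · rw [if_neg hk, hget k, hcount k hk]
  · rw [pvEnc, if_neg h0] at hy
    unfold pvAdd
    rw [hy]
    simp only
    have hv : ((ys.count y : Nat) : Int) ≠ 0 := by exact_mod_cast h0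
    rw [if_pos hv]
    refine ⟨PySem.Dict.nodup_keys_insert _ _ _ hnd, fun k => ?_⟩
    rw [PySem.Dict.get?_insert]
    by_cases hk : k = y
    · rw [if_pos hk, hk, pvEnc, List.count_append, List.count_singleton,
        if_neg (by omega)]
      simp [add_comm]
    · rw [if_neg hk, hget k, hcount k hk]

theorem pvWin_split (discount : List String) (i : Nat) (h : i + 10 < discount.length) :
    pvWin discount i = discount.getD i "" :: (discount.drop (i + 1)).take 9 ∧
    pvWin discount (i + 1) = (discount.drop (i + 1)).take 9 ++ [discount.getD (i + 10) ""] := by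
  constructor
  · rw [pvWin, List.drop_eq_getElem_cons (by omega), List.getD_eq_getElem discount _ (by omega),
      show (10 : Nat) = 9 + 1 from rfl, List.take_succ_cons]
  · rw [pvWin, show (10 : Nat) = 9 + 1 from rfl, List.take_succ, List.getElem?_drop,
      List.getElem?_eq_getElem (by omega), List.getD_eq_getElem discount _ (by omega)]
    rfl

theorem pvRep_eqB (items c : PySem.Dict String Int) (xs : List String) (h : pvRep c xs) :
    pvDictEqB items c = pvDictEqB items (PySem.Dict.counter xs) := by
  exact pvDictEqB_congr items c _ fun k => (h.2 k).trans (counter_get?_eq_enc xs k).symm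

theorem Aloop_spec (items : PySem.Dict String Int) (discount : List String)
    (cart0 : PySem.Dict String Int) (h0 : pvRep cart0 (pvWin discount 0))
    (j : Nat) (hj : j ≤ discount.length - 10) :
    pvRep ((List.range j).foldl (pvStep items discount) (cart0, 0)).1 (pvWin discount j) ∧
    ((List.range j).foldl (pvStep items discount) (cart0, 0)).2 =
      ((List.range j).countP
        (fun i => pvDictEqB items (PySem.Dict.counter (pvWin discount (i + 1)))) : Int) := by
  induction j with
  | zero => simpa using h0
  | succ j ih =>
      have hlt : j + 10 < discount.length := by omega
      obtain ⟨ih1, ih2⟩ := ih (by omega)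
      obtain ⟨hw1, hw2⟩ := pvWin_split discount j hlt
      rw [List.range_succ, List.foldl_append, List.countP_append]
      simp only [List.foldl_cons, List.foldl_nil]
      have hrep2 : pvRep (pvAdd (pvRemove ((List.range j).foldl (pvStep items discount) (cart0, 0)).1
          (discount.getD j "")) (discount.getD (j + 10) "")) (pvWin discount (j + 1)) := by
        rw [hw2]
        exact pvRep_add _ _ _ (pvRep_remove _ _ _ (by rw [← hw1]; exact ih1))
      constructor
      · exact hrep2
      · show (if pvDictEqB items _ then _ + 1 else _) = _
        rw [pvRep_eqB items _ _ hrep2, ih2]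
        by_cases hm : pvDictEqB items (PySem.Dict.counter (pvWin discount (j + 1))) = true
        · rw [if_pos hm]
          simp [List.countP_cons, hm]
        · rw [if_neg hm]
          simp [List.countP_cons, Bool.of_not_eq_true hm]

theorem cart0_rep (discount : List String) :
    pvRep ((PySem.List.slice discount none (some 10)).foldl
      (fun c item => if ¬ c.contains item then c.insert item 1 else c.insert item (c.getD item 0 + 1))
      PySem.Dict.empty) (pvWin discount 0) := by
  rw [PySem.List.slice_to discount (by norm_num)]
  have : (10 : Int).toNat = 10 := rfl
  rw [this]
  rw [PySem.List.foldl_congr_mem _ _ (fun d x => d.insert x (d.getD x 0 + 1)) _ ?_]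
  · rw [PySem.Dict.foldl_insert_getD_add_one_eq_counter]
    have : pvWin discount 0 = discount.take 10 := by rw [pvWin, List.drop_zero]
    rw [this]
    exact pvRep_counter _
  · intro acc x _
    by_cases hc : acc.contains x = true
    · simp [hc]
    · have hf : acc.contains x = false := by simpa using hc
      rw [if_pos (by simp [hf])]
      show acc.insert x 1 = acc.insert x (acc.getD x 0 + 1)
      rw [PySem.Dict.getD_of_not_contains acc 0 hf]
      norm_num

theorem solution_eq_countP (want : List String) (number : List Int) (discount : List String) :
    solution want number discount =
      ((List.range (discount.length - 10)).countP
        (fun i => pvDictEqB ((want.zip number).foldl (fun d p => d.insert p.1 p.2) PySem.Dict.empty)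
          (PySem.Dict.counter (pvWin discount (i + 1)))) : Int) := by
  unfold solution
  exact (Aloop_spec _ discount _ (cart0_rep discount) _ le_rfl).2

theorem solution_alt_eq_countP (want : List String) (number : List Int) (discount : List String) :
    solution_alt want number discount =
      ((List.range (discount.length - 9)).countP
        (fun s => pvDictEqB ((want.zip number).foldl (fun d p => d.insert p.1 p.2) PySem.Dict.empty)
          (PySem.Dict.counter (pvWin discount s))) : Int) := by
  have h1 : solution_alt want number discount =
      (List.range (discount.length - 9)).foldl
        (fun (total : Int) s =>
          if pvDictEqB ((want.zip number).foldl (fun d p => d.insert p.1 p.2) PySem.Dict.empty)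
            (PySem.Dict.counter (pvWin discount s)) then total + 1 else total) 0 := by
    unfold solution_alt
    refine PySem.List.foldl_congr_mem _ _ _ _ ?_
    intro acc s _
    show (if pvDictEqB ((PySem.List.slice discount (some (s : Int)) (some ((s : Int) + 10))).foldl
        (fun d item => d.insert item (d.getD item 0 + 1)) PySem.Dict.empty)
        ((want.zip number).foldl (fun d p => d.insert p.1 p.2) PySem.Dict.empty)
      then acc + 1 else acc) = _
    have hcast : ((s : Int) + 10) = ((s + 10 : Nat) : Int) := by push_cast; ring
    rw [hcast, PySem.List.slice_natCast discount s (s + 10),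
      show s + 10 - s = 10 from by omega,
      PySem.Dict.foldl_insert_getD_add_one_eq_counter,
      pvDictEqB_symm]
    rfl
  rw [h1, PySem.List.foldl_if_add_one
      (fun s => pvDictEqB ((want.zip number).foldl (fun d p => d.insert p.1 p.2) PySem.Dict.empty)
        (PySem.Dict.counter (pvWin discount s)))]
  simp

theorem alt_eq_sol_add (want : List String) (number : List Int) (discount : List String) :
    solution_alt want number discount =
      solution want number discount +
        (if D_solution want number discount then 1 else 0) := by
  rw [solution_eq_countP, solution_alt_eq_countP]
  by_cases h10 : 10 ≤ discount.length
  · rw [show discount.length - 9 = (discount.length - 10) + 1 from by omega,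
      List.range_succ_eq_map, List.countP_cons, List.countP_map]
    have hD : D_solution want number discount ↔
        pvDictEqB ((want.zip number).foldl (fun d p => d.insert p.1 p.2) PySem.Dict.empty)
          (PySem.Dict.counter (pvWin discount 0)) = true := by
      unfold D_solution
      rw [pvWin, List.drop_zero, pvDictEqB_symm]
      have : PySem.Dict.ofList (want.zip number) =
          (want.zip number).foldl (fun d p => d.insert p.1 p.2) PySem.Dict.empty := rfl
      rw [this]
      exact ⟨fun h => h.2, fun h => ⟨h10, h⟩⟩
    have hcomp : (fun i => pvDictEqB ((want.zip number).foldl (fun d p => d.insert p.1 p.2) PySem.Dict.empty)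
          (PySem.Dict.counter (pvWin discount (i + 1)))) =
        ((fun s => pvDictEqB ((want.zip number).foldl (fun d p => d.insert p.1 p.2) PySem.Dict.empty)
          (PySem.Dict.counter (pvWin discount s))) ∘ Nat.succ) := by
      funext i; rfl
    rw [← hcomp]
    by_cases hm : D_solution want number discount
    · rw [if_pos hm]
      have := hD.1 hm
      simp [this]
    · rw [if_neg hm]
      have : pvDictEqB ((want.zip number).foldl (fun d p => d.insert p.1 p.2) PySem.Dict.empty)
          (PySem.Dict.counter (pvWin discount 0)) = false := by
        cases hb : pvDictEqB ((want.zip number).foldl (fun d p => d.insert p.1 p.2) PySem.Dict.empty)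
            (PySem.Dict.counter (pvWin discount 0))
        · rfl
        · exact absurd (hD.2 hb) hm
      simp [this]
  · rw [show discount.length - 9 = 0 from by omega, show discount.length - 10 = 0 from by omega]
    have : ¬ D_solution want number discount := fun h => h10 h.1
    simp [this]

-- ===== VERDICT (by name: the statement is the Claim_ definition above) =====
theorem solution_spec : Claim_unchanged_solution := by
  intro want number discount _ hD
  have h := alt_eq_sol_add want number discount
  rw [if_neg hD] at h
  omega

theorem solution_changed : Claim_changed_solution := by
  unfold Claim_changed_solution; decide

theorem solution_tight : Claim_exact_solution := by
  intro want number discount _ hD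
  have h := alt_eq_sol_add want number discount
  rw [if_pos hD] at h
  omega
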